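-- pv_equiv track=rewrite | github.com/EdwardZehuaZhang/3d-printing-monorepo | rhino8-internal-wire/actual pluggin folder/rh8/libs/UNNcBibN/wire_router/core.py | compress_index_path
-- ===== SOURCE A (Python) =====
-- from typing import Dict, FrozenSet, Iterable, Iterator, List, Optional, Sequence, Set, Tuple
--
-- GridIndex = Tuple[int, int, int]
--
-- def compress_index_path(path: Sequence[GridIndex]) -> List[GridIndex]:
--     if len(path) <= 2:
--         return list(path)
--
--     compressed = [path[0]]
--     previous_direction: Optional[GridIndex] = None
--
--     for current, nxt in zip(path[:-1], path[1:]):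
--         direction = (
--             max(-1, min(1, nxt[0] - current[0])),
--             max(-1, min(1, nxt[1] - current[1])),
--             max(-1, min(1, nxt[2] - current[2])),
--         )
--         if previous_direction is None:
--             previous_direction = direction
--             continue
--         if direction != previous_direction:
--             compressed.append(current)
--         previous_direction = direction
--
--     compressed.append(path[-1])
--     return compressed
-- ===== SOURCE B (Python) =====
-- def compress_index_path(path):
--     if len(path) <= 2:
--         return list(path)
--
--     # Stage 1: direction of every unit segment, clamped to {-1,0,1} per axis.
--     dirs = [
--         (max(-1, min(1, b[0] - a[0])),
--          max(-1, min(1, b[1] - a[1])),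
--          max(-1, min(1, b[2] - a[2])))
--         for a, b in zip(path, path[1:])
--     ]
--
--     # Stage 2: run-length encode the direction sequence.
--     runs = []
--     for d in dirs:
--         if runs and runs[-1][0] == d:
--             runs[-1][1] += 1
--         else:
--             runs.append([d, 1])
--
--     # Stage 3: rebuild the compressed path from cumulative run lengths:
--     # path[0], the vertex ending each run except the last, then path[-1].
--     out = [path[0]]
--     i = 0
--     for d, n in runs[:-1]:
--         i += n
--         out.append(path[i])
--     out.append(path[-1])
--     return out
-- ===== Notes on version B (the rewrite author's own statement) =====
-- stated objective: alternative
-- what changed: Replaces A's single stateful pass (threading previous_direction and appending points on the fly) with three staged passes: compute the clamped segment-direction list, run-length encode it, then rebuild the compressed path by indexing path at the cumulative run lengths.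
import Mathlib
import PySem

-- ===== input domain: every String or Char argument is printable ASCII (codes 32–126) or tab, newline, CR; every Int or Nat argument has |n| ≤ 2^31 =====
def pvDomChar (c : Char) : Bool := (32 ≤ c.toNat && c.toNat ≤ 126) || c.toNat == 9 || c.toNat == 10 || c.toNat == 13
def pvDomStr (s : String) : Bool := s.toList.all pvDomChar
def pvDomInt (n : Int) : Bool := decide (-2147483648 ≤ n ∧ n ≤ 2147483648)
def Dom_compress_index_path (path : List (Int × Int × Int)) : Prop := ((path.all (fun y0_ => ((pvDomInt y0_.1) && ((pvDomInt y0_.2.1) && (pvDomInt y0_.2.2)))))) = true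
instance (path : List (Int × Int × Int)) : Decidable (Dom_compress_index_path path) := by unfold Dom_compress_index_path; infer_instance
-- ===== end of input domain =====

-- B replaces A's single stateful pass with three staged passes (direction list,
-- run-length encoding, reconstruction by cumulative-run-length indexing); same O(n) cost.

-- ===== PORT A =====
-- direction = (max(-1,min(1,nxt[0]-current[0])), …)
def pvDirA (a b : Int × Int × Int) : Int × Int × Int :=
  (max (-1) (min 1 (b.1 - a.1)), max (-1) (min 1 (b.2.1 - a.2.1)), max (-1) (min 1 (b.2.2 - a.2.2)))

-- one iteration of A's for-loop: state = (compressed, previous_direction)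
def pvStepA (st : List (Int × Int × Int) × Option (Int × Int × Int))
    (pr : (Int × Int × Int) × (Int × Int × Int)) :
    List (Int × Int × Int) × Option (Int × Int × Int) :=
  let direction := pvDirA pr.1 pr.2
  match st.2 with
  | none => (st.1, some direction)
  | some pd => ((if direction ≠ pd then st.1 ++ [pr.1] else st.1), some direction)

def compress_index_path (path : List (Int × Int × Int)) : List (Int × Int × Int) :=
  if path.length ≤ 2 then path
  else
    match path with
    | [] => []  -- unreachable under the guard (length > 2)
    | p0 :: _ =>
      let pairs := (PySem.List.slice path none (some (-1))).zip (PySem.List.slice path (some 1) none)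
      let res := pairs.foldl pvStepA ([p0], (none : Option (Int × Int × Int)))
      res.1 ++ [path.getLastD p0]

-- ===== PORT B =====
def pvDirB (a b : Int × Int × Int) : Int × Int × Int :=
  (max (-1) (min 1 (b.1 - a.1)), max (-1) (min 1 (b.2.1 - a.2.1)), max (-1) (min 1 (b.2.2 - a.2.2)))

-- python builds `runs` by appending / mutating runs[-1]; modelled as a fold keeping the
-- run list REVERSED, the head being the run under construction (exact same values).
def pvRleStep (acc : List ((Int × Int × Int) × Int)) (d : Int × Int × Int) :
    List ((Int × Int × Int) × Int) :=
  match acc with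
  | (e, k) :: rs => if e = d then (e, k + 1) :: rs else (d, 1) :: (e, k) :: rs
  | [] => [(d, 1)]

-- `i += n; out.append(path[i])`; the index is always in range here, so pyGet? is some
def pvOutStep (path : List (Int × Int × Int))
    (st : List (Int × Int × Int) × Int) (r : (Int × Int × Int) × Int) :
    List (Int × Int × Int) × Int :=
  let i := st.2 + r.2
  (st.1 ++ (PySem.List.pyGet? path i).toList, i)

def compress_index_path_alt (path : List (Int × Int × Int)) : List (Int × Int × Int) :=
  if path.length ≤ 2 then path
  else
    match path with
    | [] => []  -- unreachable under the guard (length > 2)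
    | p0 :: _ =>
      let dirs := (path.zip (PySem.List.slice path (some 1) none)).map (fun pr => pvDirB pr.1 pr.2)
      let runs := (dirs.foldl pvRleStep []).reverse
      let res := (PySem.List.slice runs none (some (-1))).foldl (pvOutStep path) ([p0], 0)
      res.1 ++ [path.getLastD p0]

-- ===== PRECONDITION & SPEC =====
def Spec_compress_index_path (path : List (Int × Int × Int)) (out : List (Int × Int × Int)) : Prop := out = compress_index_path_alt path
instance (path : List (Int × Int × Int)) (out : List (Int × Int × Int)) : Decidable (Spec_compress_index_path path out) := by unfold Spec_compress_index_path; infer_instance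

-- ===== CLAIM (what is proved, stated in full; the proofs are below) =====
def Claim_equal_compress_index_path : Prop := ∀ (path : List (Int × Int × Int)), Dom_compress_index_path path → Spec_compress_index_path path (compress_index_path path)

-- ===== LEMMAS AND PROOFS =====

-- closed form of A's loop after the first iteration fixed previous_direction
def pvG (pd : Int × Int × Int) (b : Int × Int × Int) : List (Int × Int × Int) → List (Int × Int × Int)
  | [] => []
  | c :: l => (if pvDirA b c ≠ pd then [b] else []) ++ pvG (pvDirA b c) c l

-- the segment-direction sequence of a point list
def pvDirsOf : List (Int × Int × Int) → List (Int × Int × Int)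
  | b :: c :: l => pvDirA b c :: pvDirsOf (c :: l)
  | _ => []

-- structural form of the RLE fold: current run (e,k), remaining directions
def pvConsume (e : Int × Int × Int) (k : Int) : List (Int × Int × Int) → List ((Int × Int × Int) × Int)
  | [] => [(e, k)]
  | d :: ds => if e = d then pvConsume e (k + 1) ds else (e, k) :: pvConsume d 1 ds

-- fused form of (fold over (consume …).dropLast): j = current frontier index
def pvHK (P : List (Int × Int × Int)) (j : Int) (e : Int × Int × Int)
    (acc : List (Int × Int × Int)) : List (Int × Int × Int) → List (Int × Int × Int)
  | [] => acc
  | d :: ds =>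
      if e = d then pvHK P (j + 1) e acc ds
      else pvHK P (j + 1) d (acc ++ (PySem.List.pyGet? P j).toList) ds

theorem pv_pairs_cons (a b : Int × Int × Int) (l : List (Int × Int × Int)) :
    (a :: b :: l).dropLast.zip (a :: b :: l).tail
      = (a, b) :: ((b :: l).dropLast.zip (b :: l).tail) := by
  simp [List.dropLast]

theorem pv_foldA (l : List (Int × Int × Int)) : ∀ (b : Int × Int × Int)
    (acc : List (Int × Int × Int)) (pd : Int × Int × Int),
    (((b :: l).dropLast.zip (b :: l).tail).foldl pvStepA (acc, some pd)).1
      = acc ++ pvG pd b l := by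
  induction l with
  | nil => intro b acc pd; simp [pvG]
  | cons c l ih =>
    intro b acc pd
    rw [pv_pairs_cons]
    simp only [List.foldl_cons, pvStepA, pvG, ih]
    split_ifs <;> simp

theorem pv_dirs (path : List (Int × Int × Int)) :
    (path.zip path.tail).map (fun pr => pvDirB pr.1 pr.2) = pvDirsOf path := by
  induction path with
  | nil => rfl
  | cons a tl ih =>
    cases tl with
    | nil => rfl
    | cons b tl' =>
      simp only [List.tail_cons, List.zip_cons_cons, List.map_cons, pvDirsOf] at ih ⊢
      rw [← ih]
      rfl

theorem pv_rle_rev (ds : List (Int × Int × Int)) : ∀ (e : Int × Int × Int) (k : Int)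
    (rs : List ((Int × Int × Int) × Int)),
    (ds.foldl pvRleStep ((e, k) :: rs)).reverse = rs.reverse ++ pvConsume e k ds := by
  induction ds with
  | nil => intro e k rs; simp [pvConsume]
  | cons d ds ih =>
    intro e k rs
    by_cases h : e = d
    · rw [List.foldl_cons]
      have hs : pvRleStep ((e, k) :: rs) d = (e, k + 1) :: rs := by simp [pvRleStep, h]
      rw [hs, ih e (k + 1) rs]
      simp [pvConsume, h]
    · rw [List.foldl_cons]
      have hs : pvRleStep ((e, k) :: rs) d = (d, 1) :: (e, k) :: rs := by simp [pvRleStep, h]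
      rw [hs, ih d 1 ((e, k) :: rs)]
      simp [pvConsume, h]

theorem pv_consume_ne_nil (ds : List (Int × Int × Int)) : ∀ (e : Int × Int × Int) (k : Int),
    pvConsume e k ds ≠ [] := by
  induction ds with
  | nil => intro e k; simp [pvConsume]
  | cons d ds ih =>
    intro e k
    simp only [pvConsume]
    by_cases h : e = d
    · simp [h, ih]
    · simp [h]

theorem pv_fuse (P : List (Int × Int × Int)) (ds : List (Int × Int × Int)) :
    ∀ (e : Int × Int × Int) (k i : Int) (acc : List (Int × Int × Int)),
    (((pvConsume e k ds).dropLast).foldl (pvOutStep P) (acc, i)).1 = pvHK P (i + k) e acc ds := by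
  induction ds with
  | nil => intro e k i acc; simp [pvConsume, pvHK]
  | cons d ds ih =>
    intro e k i acc
    by_cases h : e = d
    · have hc : pvConsume e k (d :: ds) = pvConsume e (k + 1) ds := by simp [pvConsume, h]
      have hh : pvHK P (i + k) e acc (d :: ds) = pvHK P (i + k + 1) e acc ds := by
        simp [pvHK, h]
      rw [hc, ih e (k + 1) i acc, hh]
      have harith : i + (k + 1) = i + k + 1 := by ring
      rw [harith]
    · have hc : pvConsume e k (d :: ds) = (e, k) :: pvConsume d 1 ds := by simp [pvConsume, h]
      have hh : pvHK P (i + k) e acc (d :: ds)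
          = pvHK P (i + k + 1) d (acc ++ (PySem.List.pyGet? P (i + k)).toList) ds := by
        simp [pvHK, h]
      rw [hc, List.dropLast_cons_of_ne_nil (pv_consume_ne_nil ds d 1), List.foldl_cons]
      simp only [pvOutStep]
      rw [ih d 1 (i + k) (acc ++ (PySem.List.pyGet? P (i + k)).toList), hh]

theorem pv_hk_spec (P : List (Int × Int × Int)) (l : List (Int × Int × Int)) :
    ∀ (b : Int × Int × Int) (j : ℕ) (e : Int × Int × Int) (acc : List (Int × Int × Int)),
    P.drop j = b :: l →
    pvHK P (j : Int) e acc (pvDirsOf (b :: l)) = acc ++ pvG e b l := by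
  induction l with
  | nil => intro b j e acc _; simp [pvDirsOf, pvHK, pvG]
  | cons c l ih =>
    intro b j e acc hdrop
    have hdrop' : P.drop (j + 1) = c :: l := by
      have : P.drop (j + 1) = (P.drop j).drop 1 := by
        rw [List.drop_drop]
      rw [this, hdrop]; rfl
    have hget : P[j]? = some b := by
      have h0 : (P.drop j)[0]? = some b := by rw [hdrop]; rfl
      rw [List.getElem?_drop] at h0
      simpa using h0
    simp only [pvDirsOf, pvHK, pvG]
    by_cases h : e = pvDirA b c
    · simp only [if_pos h]
      have hcast : (j : Int) + 1 = ((j + 1 : ℕ) : Int) := by push_cast; ring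
      rw [hcast, ih c (j + 1) e acc hdrop']
      simp [← h]
    · simp only [if_neg h]
      have hbl : (PySem.List.pyGet? P (j : Int)).toList = [b] := by
        rw [PySem.List.pyGet?_natCast, hget]; rfl
      have hcast : (j : Int) + 1 = ((j + 1 : ℕ) : Int) := by push_cast; ring
      rw [hbl, hcast, ih c (j + 1) (pvDirA b c) (acc ++ [b]) hdrop']
      have : pvDirA b c ≠ e := fun hx => h hx.symm
      simp [this]

-- ===== VERDICT (by name: the statement is the Claim_ definition above) =====
theorem compress_index_path_spec : Claim_equal_compress_index_path := by
  intro path _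
  unfold Spec_compress_index_path compress_index_path compress_index_path_alt
  by_cases hlen : path.length ≤ 2
  · simp [hlen]
  · match path, hlen with
    | a :: b :: c :: l, hlen =>
      simp only [if_neg hlen]
      rw [PySem.List.slice_to_neg_one, PySem.List.slice_from_one]
      -- A side
      rw [pv_pairs_cons]
      simp only [List.foldl_cons, pvStepA]
      rw [pv_foldA]
      -- B side
      rw [pv_dirs]
      have hd : pvDirsOf (a :: b :: c :: l) = pvDirA a b :: pvDirsOf (b :: c :: l) := rfl
      rw [hd]
      simp only [List.foldl_cons, pvRleStep]
      rw [PySem.List.slice_to_neg_one]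
      have hrev : ((pvDirsOf (b :: c :: l)).foldl pvRleStep [(pvDirA a b, 1)]).reverse
          = pvConsume (pvDirA a b) 1 (pvDirsOf (b :: c :: l)) := by
        rw [pv_rle_rev]; rfl
      rw [hrev, pv_fuse]
      have h01 : (0 : Int) + 1 = ((1 : ℕ) : Int) := by norm_num
      rw [h01, pv_hk_spec (a :: b :: c :: l) (c :: l) b 1 (pvDirA a b) [a] rfl]
    | [], hlen => exact absurd (by simp) hlen
    | [a], hlen => exact absurd (by simp) hlen
    | [a, b], hlen => exact absurd (by simp) hlen
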